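-- pv_equiv track=rewrite | github.com/scruzzimattia-blip/npm-stats | src/blocking.py | _check_waf_rules
-- ===== SOURCE A (Python) =====
-- from typing import Dict, Optional, Set
--
-- def _check_waf_rules(path: str, user_agent: str = "") -> Optional[str]:
--     """Task 3: Check for SQLi, XSS, Path Traversal, and Modern Threats (Log4Shell, etc.)."""
--     if not path:
--         return None
--
--     combined_input = (path + " " + user_agent).lower()
--
--     # 1. SQLi heuristic
--     sqli_patterns = [
--         "union select",
--         "union all select",
--         "' or '1'='1",
--         '" or "1"="1',
--         "@@version",
--         "information_schema",
--         "sysobjects",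
--         "syscolumns",
--         "waitfor delay",
--         "pg_sleep(",
--     ]
--     if any(pattern in combined_input for pattern in sqli_patterns):
--         return "SQL-Injection Versuch (WAF Heuristik)"
--
--     # 2. XSS heuristic
--     xss_patterns = ["<script", "%3cscript", "javascript:", "onerror=", "onload=", "alert("]
--     if any(pattern in combined_input for pattern in xss_patterns):
--         return "XSS Versuch (WAF Heuristik)"
--
--     # 3. Path Traversal & LFI
--     traversal_patterns = [
--         "../",
--         "..\\",
--         "/etc/passwd",
--         "/etc/shadow",
--         "/etc/group",
--         "c:\\windows",
--         "boot.ini",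
--         "/proc/self",
--         "file_get_contents",
--         "include(",
--     ]
--     if any(pattern in combined_input for pattern in traversal_patterns):
--         return "Path Traversal / LFI Versuch (WAF Heuristik)"
--
--     # 4. Modern Threats & Exploits
--     modern_exploits = {
--         "${jndi:ldap": "Log4Shell Exploit Versuch (CVE-2021-44228)",
--         "${jndi:dns": "Log4Shell Exploit Versuch (CVE-2021-44228)",
--         "class.module.classloader": "SpringShell Exploit Versuch (CVE-2022-22965)",
--         "/cgi-bin/": "CGI-BIN Scan / Exploit Versuch",
--         "() { :; };": "Shellshock Exploit Versuch (CVE-2014-6271)",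
--         ".aws/credentials": "Cloud Credential Theft Versuch",
--         ".ssh/id_rsa": "SSH Key Theft Versuch",
--     }
--     for pattern, reason in modern_exploits.items():
--         if pattern in combined_input:
--             return reason
--
--     # 5. Command Injection
--     cmd_patterns = [
--         "; curl ",
--         "; wget ",
--         "; chmod ",
--         "; chown ",
--         "; rm -rf",
--         "| curl ",
--         "| wget ",
--         "| chmod ",
--         "`curl ",
--         "`wget ",
--     ]
--     if any(pattern in combined_input for pattern in cmd_patterns):
--         return "Command Injection Versuch (WAF Heuristik)"
--
--     return None
-- ===== SOURCE B (Python) =====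
-- # B: text-major scan — walk the combined input once position by position; a bucket
-- # index (first pattern character -> list of (rule index, pattern)) tells which
-- # patterns can start at the current position; keep the smallest rule index that
-- # matches anywhere and return that rule's reason.  Correct because the first rule
-- # (in table order) whose pattern occurs anywhere in the text is exactly the
-- # minimal matched index, regardless of the order positions are visited.
-- _WAF_RULES = [
--     ("union select", "SQL-Injection Versuch (WAF Heuristik)"),
--     ("union all select", "SQL-Injection Versuch (WAF Heuristik)"),
--     ("' or '1'='1", "SQL-Injection Versuch (WAF Heuristik)"),
--     ('" or "1"="1', "SQL-Injection Versuch (WAF Heuristik)"),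
--     ("@@version", "SQL-Injection Versuch (WAF Heuristik)"),
--     ("information_schema", "SQL-Injection Versuch (WAF Heuristik)"),
--     ("sysobjects", "SQL-Injection Versuch (WAF Heuristik)"),
--     ("syscolumns", "SQL-Injection Versuch (WAF Heuristik)"),
--     ("waitfor delay", "SQL-Injection Versuch (WAF Heuristik)"),
--     ("pg_sleep(", "SQL-Injection Versuch (WAF Heuristik)"),
--     ("<script", "XSS Versuch (WAF Heuristik)"),
--     ("%3cscript", "XSS Versuch (WAF Heuristik)"),
--     ("javascript:", "XSS Versuch (WAF Heuristik)"),
--     ("onerror=", "XSS Versuch (WAF Heuristik)"),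
--     ("onload=", "XSS Versuch (WAF Heuristik)"),
--     ("alert(", "XSS Versuch (WAF Heuristik)"),
--     ("../", "Path Traversal / LFI Versuch (WAF Heuristik)"),
--     ("..\\", "Path Traversal / LFI Versuch (WAF Heuristik)"),
--     ("/etc/passwd", "Path Traversal / LFI Versuch (WAF Heuristik)"),
--     ("/etc/shadow", "Path Traversal / LFI Versuch (WAF Heuristik)"),
--     ("/etc/group", "Path Traversal / LFI Versuch (WAF Heuristik)"),
--     ("c:\\windows", "Path Traversal / LFI Versuch (WAF Heuristik)"),
--     ("boot.ini", "Path Traversal / LFI Versuch (WAF Heuristik)"),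
--     ("/proc/self", "Path Traversal / LFI Versuch (WAF Heuristik)"),
--     ("file_get_contents", "Path Traversal / LFI Versuch (WAF Heuristik)"),
--     ("include(", "Path Traversal / LFI Versuch (WAF Heuristik)"),
--     ("${jndi:ldap", "Log4Shell Exploit Versuch (CVE-2021-44228)"),
--     ("${jndi:dns", "Log4Shell Exploit Versuch (CVE-2021-44228)"),
--     ("class.module.classloader", "SpringShell Exploit Versuch (CVE-2022-22965)"),
--     ("/cgi-bin/", "CGI-BIN Scan / Exploit Versuch"),
--     ("() { :; };", "Shellshock Exploit Versuch (CVE-2014-6271)"),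
--     (".aws/credentials", "Cloud Credential Theft Versuch"),
--     (".ssh/id_rsa", "SSH Key Theft Versuch"),
--     ("; curl ", "Command Injection Versuch (WAF Heuristik)"),
--     ("; wget ", "Command Injection Versuch (WAF Heuristik)"),
--     ("; chmod ", "Command Injection Versuch (WAF Heuristik)"),
--     ("; chown ", "Command Injection Versuch (WAF Heuristik)"),
--     ("; rm -rf", "Command Injection Versuch (WAF Heuristik)"),
--     ("| curl ", "Command Injection Versuch (WAF Heuristik)"),
--     ("| wget ", "Command Injection Versuch (WAF Heuristik)"),
--     ("| chmod ", "Command Injection Versuch (WAF Heuristik)"),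
--     ("`curl ", "Command Injection Versuch (WAF Heuristik)"),
--     ("`wget ", "Command Injection Versuch (WAF Heuristik)"),
-- ]
--
-- _BUCKETS = {}
-- for _i, (_p, _r) in enumerate(_WAF_RULES):
--     _BUCKETS[_p[0]] = _BUCKETS.get(_p[0], []) + [(_i, _p)]
--
-- def _check_waf_rules(path, user_agent=""):
--     if not path:
--         return None
--     s = (path + " " + user_agent).lower()
--     best = None  # smallest rule index seen to start at any position
--     for pos, ch in enumerate(s):
--         for idx, pat in _BUCKETS.get(ch, []):
--             if (best is None or idx < best) and s.startswith(pat, pos):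
--                 best = idx
--     return None if best is None else _WAF_RULES[best][1]
-- ===== Notes on version B (the rewrite author's own statement) =====
-- stated objective: alternative
-- what changed: Replaces A's pattern-major scans (five any() substring-membership checks plus a dict loop with early return) by a text-major algorithm: one pass over the positions of the combined input, a first-character bucket index (char -> list of rule-index/pattern pairs) selecting which patterns can start at each position, keeping the minimal matched rule index and returning its reason.
import Mathlib
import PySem

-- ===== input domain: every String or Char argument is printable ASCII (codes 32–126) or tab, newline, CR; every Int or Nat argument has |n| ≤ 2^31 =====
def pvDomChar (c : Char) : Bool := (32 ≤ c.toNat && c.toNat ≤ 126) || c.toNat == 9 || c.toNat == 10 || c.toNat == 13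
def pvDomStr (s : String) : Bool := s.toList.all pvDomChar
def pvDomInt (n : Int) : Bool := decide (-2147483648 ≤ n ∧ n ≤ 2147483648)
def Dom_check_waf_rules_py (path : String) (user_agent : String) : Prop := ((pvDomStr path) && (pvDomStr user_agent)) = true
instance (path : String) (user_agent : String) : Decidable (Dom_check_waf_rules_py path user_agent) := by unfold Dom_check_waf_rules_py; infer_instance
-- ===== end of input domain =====

-- B replaces A's pattern-major 'pattern in input' scans by a text-major pass: one walk
-- over the positions of the combined input, with a first-character bucket index telling
-- which rules can start at each position; the minimal matched rule index is returned.

-- ===== PORT A =====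
def sqliPatterns : List (List Char) :=
  ["union select".toList, "union all select".toList, "' or '1'='1".toList,
   "\" or \"1\"=\"1".toList, "@@version".toList, "information_schema".toList,
   "sysobjects".toList, "syscolumns".toList, "waitfor delay".toList, "pg_sleep(".toList]

def xssPatterns : List (List Char) :=
  ["<script".toList, "%3cscript".toList, "javascript:".toList, "onerror=".toList,
   "onload=".toList, "alert(".toList]

def traversalPatterns : List (List Char) :=
  ["../".toList, "..\\".toList, "/etc/passwd".toList, "/etc/shadow".toList,
   "/etc/group".toList, "c:\\windows".toList, "boot.ini".toList, "/proc/self".toList,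
   "file_get_contents".toList, "include(".toList]

def modernExploits : List (List Char × String) :=
  [("${jndi:ldap".toList, "Log4Shell Exploit Versuch (CVE-2021-44228)"),
   ("${jndi:dns".toList, "Log4Shell Exploit Versuch (CVE-2021-44228)"),
   ("class.module.classloader".toList, "SpringShell Exploit Versuch (CVE-2022-22965)"),
   ("/cgi-bin/".toList, "CGI-BIN Scan / Exploit Versuch"),
   ("() { :; };".toList, "Shellshock Exploit Versuch (CVE-2014-6271)"),
   (".aws/credentials".toList, "Cloud Credential Theft Versuch"),
   (".ssh/id_rsa".toList, "SSH Key Theft Versuch")]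

def cmdPatterns : List (List Char) :=
  ["; curl ".toList, "; wget ".toList, "; chmod ".toList, "; chown ".toList,
   "; rm -rf".toList, "| curl ".toList, "| wget ".toList, "| chmod ".toList,
   "`curl ".toList, "`wget ".toList]

-- the 'for pattern, reason in modern_exploits.items(): if pattern in …: return reason' loop
def modernLoop (items : List (List Char × String)) (ci : List Char) : Option String :=
  match items with
  | [] => none
  | (p, r) :: rest => if PySem.Chars.isIn p ci then some r else modernLoop rest ci

def check_waf_rules_py (path : String) (user_agent : String) : Option String :=
  if path.toList = [] then none
  else
    let ci := PySem.Chars.lower (path.toList ++ ' ' :: user_agent.toList)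
    if sqliPatterns.any (fun p => PySem.Chars.isIn p ci) then
      some "SQL-Injection Versuch (WAF Heuristik)"
    else if xssPatterns.any (fun p => PySem.Chars.isIn p ci) then
      some "XSS Versuch (WAF Heuristik)"
    else if traversalPatterns.any (fun p => PySem.Chars.isIn p ci) then
      some "Path Traversal / LFI Versuch (WAF Heuristik)"
    else
      match modernLoop modernExploits ci with
      | some r => some r
      | none =>
        if cmdPatterns.any (fun p => PySem.Chars.isIn p ci) then
          some "Command Injection Versuch (WAF Heuristik)"
        else none

-- ===== PORT B =====
def wafRules : List (List Char × String) :=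
  [("union select".toList, "SQL-Injection Versuch (WAF Heuristik)"),
   ("union all select".toList, "SQL-Injection Versuch (WAF Heuristik)"),
   ("' or '1'='1".toList, "SQL-Injection Versuch (WAF Heuristik)"),
   ("\" or \"1\"=\"1".toList, "SQL-Injection Versuch (WAF Heuristik)"),
   ("@@version".toList, "SQL-Injection Versuch (WAF Heuristik)"),
   ("information_schema".toList, "SQL-Injection Versuch (WAF Heuristik)"),
   ("sysobjects".toList, "SQL-Injection Versuch (WAF Heuristik)"),
   ("syscolumns".toList, "SQL-Injection Versuch (WAF Heuristik)"),
   ("waitfor delay".toList, "SQL-Injection Versuch (WAF Heuristik)"),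
   ("pg_sleep(".toList, "SQL-Injection Versuch (WAF Heuristik)"),
   ("<script".toList, "XSS Versuch (WAF Heuristik)"),
   ("%3cscript".toList, "XSS Versuch (WAF Heuristik)"),
   ("javascript:".toList, "XSS Versuch (WAF Heuristik)"),
   ("onerror=".toList, "XSS Versuch (WAF Heuristik)"),
   ("onload=".toList, "XSS Versuch (WAF Heuristik)"),
   ("alert(".toList, "XSS Versuch (WAF Heuristik)"),
   ("../".toList, "Path Traversal / LFI Versuch (WAF Heuristik)"),
   ("..\\".toList, "Path Traversal / LFI Versuch (WAF Heuristik)"),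
   ("/etc/passwd".toList, "Path Traversal / LFI Versuch (WAF Heuristik)"),
   ("/etc/shadow".toList, "Path Traversal / LFI Versuch (WAF Heuristik)"),
   ("/etc/group".toList, "Path Traversal / LFI Versuch (WAF Heuristik)"),
   ("c:\\windows".toList, "Path Traversal / LFI Versuch (WAF Heuristik)"),
   ("boot.ini".toList, "Path Traversal / LFI Versuch (WAF Heuristik)"),
   ("/proc/self".toList, "Path Traversal / LFI Versuch (WAF Heuristik)"),
   ("file_get_contents".toList, "Path Traversal / LFI Versuch (WAF Heuristik)"),
   ("include(".toList, "Path Traversal / LFI Versuch (WAF Heuristik)"),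
   ("${jndi:ldap".toList, "Log4Shell Exploit Versuch (CVE-2021-44228)"),
   ("${jndi:dns".toList, "Log4Shell Exploit Versuch (CVE-2021-44228)"),
   ("class.module.classloader".toList, "SpringShell Exploit Versuch (CVE-2022-22965)"),
   ("/cgi-bin/".toList, "CGI-BIN Scan / Exploit Versuch"),
   ("() { :; };".toList, "Shellshock Exploit Versuch (CVE-2014-6271)"),
   (".aws/credentials".toList, "Cloud Credential Theft Versuch"),
   (".ssh/id_rsa".toList, "SSH Key Theft Versuch"),
   ("; curl ".toList, "Command Injection Versuch (WAF Heuristik)"),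
   ("; wget ".toList, "Command Injection Versuch (WAF Heuristik)"),
   ("; chmod ".toList, "Command Injection Versuch (WAF Heuristik)"),
   ("; chown ".toList, "Command Injection Versuch (WAF Heuristik)"),
   ("; rm -rf".toList, "Command Injection Versuch (WAF Heuristik)"),
   ("| curl ".toList, "Command Injection Versuch (WAF Heuristik)"),
   ("| wget ".toList, "Command Injection Versuch (WAF Heuristik)"),
   ("| chmod ".toList, "Command Injection Versuch (WAF Heuristik)"),
   ("`curl ".toList, "Command Injection Versuch (WAF Heuristik)"),
   ("`wget ".toList, "Command Injection Versuch (WAF Heuristik)")]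

-- module-level bucket build: for _i, (_p, _r) in enumerate(_WAF_RULES):
--   _BUCKETS[_p[0]] = _BUCKETS.get(_p[0], []) + [(_i, _p)]
-- (indices of enumerate are 0..len-1, so Nat via zipIdx is exact; every pattern is
-- nonempty, so _p[0] is headD ' ' exactly)
def wafKeyed : List (Char × (Nat × List Char)) :=
  wafRules.zipIdx.map (fun pr => (pr.1.1.headD ' ', (pr.2, pr.1.1)))

def wafBucketDict : PySem.Dict Char (List (Nat × List Char)) :=
  wafKeyed.foldl (fun d p => d.modify p.1 [] (· ++ [p.2])) PySem.Dict.empty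

-- inner loop body: '(best is None or idx < best) and s.startswith(pat, pos)' then 'best = idx'
-- s.startswith(pat, pos) with 0 ≤ pos < len(s) is exactly Chars.startswith (s.drop pos) pat
def bucketStep (ci : List Char) (pos : Nat) (b : Option Nat) (ip : Nat × List Char) :
    Option Nat :=
  if (match b with | none => true | some j => decide (ip.1 < j)) &&
     PySem.Chars.startswith (ci.drop pos) ip.2 then some ip.1 else b

def check_waf_rules_py_alt (path : String) (user_agent : String) : Option String :=
  if path.toList = [] then none
  else
    let ci := PySem.Chars.lower (path.toList ++ ' ' :: user_agent.toList)
    -- 'for pos, ch in enumerate(s)': positions are 0..len-1, Nat via zipIdx is exact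
    let best := ci.zipIdx.foldl
      (fun b pc => (wafBucketDict.getD pc.1 []).foldl (bucketStep ci pc.2) b) none
    match best with
    | none => none
    | some i => (wafRules[i]?).map Prod.snd

-- ===== PRECONDITION & SPEC =====
def Spec_check_waf_rules_py (path : String) (user_agent : String) (out : Option String) : Prop := out = check_waf_rules_py_alt path user_agent
instance (path : String) (user_agent : String) (out : Option String) : Decidable (Spec_check_waf_rules_py path user_agent out) := by unfold Spec_check_waf_rules_py; infer_instance

-- ===== CLAIM (what is proved, stated in full; the proofs are below) =====
def Claim_equal_check_waf_rules_py : Prop := ∀ (path : String) (user_agent : String), Dom_check_waf_rules_py path user_agent → Spec_check_waf_rules_py path user_agent (check_waf_rules_py path user_agent)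

-- ===== LEMMAS AND PROOFS =====

-- option-min (none = +∞), the value the position fold accumulates
def omin : Option Nat → Option Nat → Option Nat
  | none, y => y
  | some j, none => some j
  | some j, some i => some (min j i)

lemma omin_some_zero (x : Option Nat) : omin (some 0) x = some 0 := by
  cases x <;> simp [omin]

lemma omin_map_succ (a c : Option Nat) :
    omin (a.map (· + 1)) (c.map (· + 1)) = (omin a c).map (· + 1) := by
  cases a <;> cases c <;> simp [omin, Nat.succ_min_succ]

-- once the accumulator is 0 it stays 0
lemma foldl_omin_zero {β : Type} (f : β → Option Nat) (ps : List β) :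
    ps.foldl (fun b pos => omin b (f pos)) (some 0) = some 0 := by
  induction ps with
  | nil => rfl
  | cons p ps ih => simp [List.foldl_cons, omin_some_zero, ih]

-- the fold commutes with shifting every candidate index by one
lemma foldl_omin_map_succ {β : Type} (f : β → Option Nat) (ps : List β) (b : Option Nat) :
    ps.foldl (fun b pos => omin b ((f pos).map (· + 1))) (b.map (· + 1))
      = (ps.foldl (fun b pos => omin b (f pos)) b).map (· + 1) := by
  induction ps generalizing b with
  | nil => rfl
  | cons p ps ih => simp only [List.foldl_cons, omin_map_succ, ih]

-- once the accumulator is ≤ every remaining bucket index, the inner loop keeps it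
lemma bucketFold_stay (ci : List Char) (pos : Nat) :
    ∀ (l : List (Nat × List Char)) (j : Nat), (∀ ip ∈ l, j ≤ ip.1) →
      l.foldl (bucketStep ci pos) (some j) = some j := by
  intro l
  induction l with
  | nil => intro j _; rfl
  | cons ip l ih =>
    intro j hle
    have h1 : j ≤ ip.1 := hle ip (by simp)
    have hstep : bucketStep ci pos (some j) ip = some j := by
      simp [bucketStep, Nat.not_lt.mpr h1]
    rw [List.foldl_cons, hstep]
    exact ih j (fun x hx => hle x (by simp [hx]))

-- the inner bucket loop computes omin best (index of the first bucket entry matching here),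
-- provided the bucket's indices are strictly increasing
lemma bucketFold (ci : List Char) (pos : Nat) :
    ∀ (l : List (Nat × List Char)) (b : Option Nat),
      l.Pairwise (fun x y => x.1 < y.1) →
      l.foldl (bucketStep ci pos) b
        = omin b ((l.find? (fun ip => PySem.Chars.startswith (ci.drop pos) ip.2)).map (·.1)) := by
  intro l
  induction l with
  | nil => intro b _; cases b <;> simp [omin]
  | cons ip l ih =>
    intro b hpw
    rw [List.pairwise_cons] at hpw
    obtain ⟨h1, h2⟩ := hpw
    rw [List.foldl_cons]
    by_cases hm : PySem.Chars.startswith (ci.drop pos) ip.2 = true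
    · rw [List.find?_cons_of_pos (by simpa using hm)]
      cases b with
      | none =>
        have hstep : bucketStep ci pos none ip = some ip.1 := by simp [bucketStep, hm]
        rw [hstep, bucketFold_stay ci pos l ip.1 (fun x hx => Nat.le_of_lt (h1 x hx))]
        simp [omin]
      | some j0 =>
        by_cases hk : ip.1 < j0
        · have hstep : bucketStep ci pos (some j0) ip = some ip.1 := by
            simp [bucketStep, hm, hk]
          rw [hstep, bucketFold_stay ci pos l ip.1 (fun x hx => Nat.le_of_lt (h1 x hx))]
          simp [omin]; omega
        · have hstep : bucketStep ci pos (some j0) ip = some j0 := by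
            simp [bucketStep, hm, hk]
          rw [hstep, bucketFold_stay ci pos l j0
            (fun x hx => Nat.le_trans (Nat.not_lt.mp hk) (Nat.le_of_lt (h1 x hx)))]
          simp [omin]; omega
    · have hm' : PySem.Chars.startswith (ci.drop pos) ip.2 = false := by simpa using hm
      have hstep : bucketStep ci pos b ip = b := by simp [bucketStep, hm']
      rw [hstep, List.find?_cons_of_neg (by simp [hm']), ih b h2]

-- indices produced by zipIdx are strictly increasing
lemma zipIdx_pairwise {α : Type} : ∀ (l : List α) (k : Nat),
    (l.zipIdx k).Pairwise (fun x y => x.2 < y.2) := by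
  intro l
  induction l with
  | nil => intro k; simp
  | cons a l ih =>
    intro k
    rw [List.zipIdx_cons]
    refine List.Pairwise.cons ?_ (ih (k + 1))
    intro y hy
    have hm := List.mem_zipIdx (show (y.1, y.2) ∈ l.zipIdx (k + 1) by simpa using hy)
    omega

-- looking up a bucket = filtering the enumerated rule table by first character
lemma getD_bucket (c : Char) :
    wafBucketDict.getD c []
      = (wafRules.zipIdx.filter (fun pr => pr.1.1.headD ' ' == c)).map
          (fun pr => (pr.2, pr.1.1)) := by
  unfold wafBucketDict wafKeyed
  rw [PySem.Dict.getD_foldl_modify_append, List.filter_map]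
  simp [PySem.Dict.getD_empty, List.map_map, Function.comp_def]

-- a nonempty pattern starting at pos begins with the character at pos
lemma head_of_startswith (ci p : List Char) (pos : Nat) (hp : p ≠ []) (hpos : pos < ci.length)
    (hm : PySem.Chars.startswith (ci.drop pos) p = true) :
    (p.headD ' ' == ci[pos]) = true := by
  have hpref := (PySem.Chars.startswith_iff _ _).mp hm
  cases p with
  | nil => exact absurd rfl hp
  | cons a p' =>
    obtain ⟨t, ht⟩ := hpref
    have h1 : (ci.drop pos).head? = some a := by rw [← ht]; rfl
    rw [List.head?_drop, List.getElem?_eq_getElem hpos] at h1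
    simp at h1
    simp [h1]

-- first matching bucket entry = first matching rule, when every match stays in this bucket
lemma find_bucket (sw : List Char → Bool) (c : Char) :
    ∀ (rs : List (List Char × String)) (k : Nat),
      (∀ pr ∈ rs, sw pr.1 = true → (pr.1.headD ' ' == c) = true) →
      ((((rs.zipIdx k).filter (fun pr => pr.1.1.headD ' ' == c)).map
          (fun pr => (pr.2, pr.1.1))).find? (fun ip => sw ip.2)).map (·.1)
        = (rs.findIdx? (fun pr => sw pr.1)).map (· + k) := by
  intro rs
  induction rs with
  | nil => intro k _; simp
  | cons pr rs ih =>
    intro k hsw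
    rw [List.zipIdx_cons, List.findIdx?_cons]
    by_cases hc : (pr.1.headD ' ' == c) = true
    · rw [List.filter_cons_of_pos (by simpa using hc), List.map_cons]
      by_cases hs : sw pr.1 = true
      · rw [List.find?_cons_of_pos (by simpa using hs)]
        simp [hs]
      · have hs' : sw pr.1 = false := by simpa using hs
        rw [List.find?_cons_of_neg (by simp [hs']),
            ih (k + 1) (fun x hx hswx => hsw x (by simp [hx]) hswx)]
        simp only [hs', Bool.false_eq_true, if_false, Option.map_map]
        cases rs.findIdx? (fun pr => sw pr.1) <;> simp <;> omega
    · have hs' : sw pr.1 = false := by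
        by_contra hcon
        exact hc (hsw pr (by simp) (by simpa using hcon))
      rw [List.filter_cons_of_neg (by simpa using hc),
          ih (k + 1) (fun x hx hswx => hsw x (by simp [hx]) hswx)]
      simp only [hs', Bool.false_eq_true, if_false, Option.map_map]
      cases rs.findIdx? (fun pr => sw pr.1) <;> simp <;> omega

-- min over positions of the first rule matching there = first rule matching at some position
lemma foldl_omin_findIdx {α β : Type} (q : β → α → Bool) (rs : List α) (ps : List β) :
    ps.foldl (fun b pos => omin b (rs.findIdx? (q pos))) none
      = rs.findIdx? (fun a => ps.any (fun pos => q pos a)) := by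
  induction rs generalizing ps with
  | nil =>
    simp only [List.findIdx?_nil]
    induction ps with
    | nil => rfl
    | cons p ps ih => simpa [List.foldl_cons, omin] using ih
  | cons a rs ih =>
    by_cases h : ps.any (fun pos => q pos a)
    · -- some position matches rule a: the answer is index 0
      rw [List.any_eq_true] at h
      obtain ⟨pos0, hmem, hq⟩ := h
      obtain ⟨l, r, rfl⟩ := List.append_of_mem hmem
      rw [List.foldl_append, List.foldl_cons]
      have h0 : List.findIdx? (q pos0) (a :: rs) = some 0 := by
        simp [List.findIdx?_cons, hq]
      rw [h0]
      have : omin ((l.foldl (fun b pos => omin b (List.findIdx? (q pos) (a :: rs))) none)) (some 0)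
          = some 0 := by
        cases (l.foldl (fun b pos => omin b (List.findIdx? (q pos) (a :: rs))) none) <;>
          simp [omin]
      rw [this, foldl_omin_zero]
      have hany : ((l ++ pos0 :: r).any fun pos => q pos a) = true :=
        List.any_eq_true.mpr ⟨pos0, hmem, hq⟩
      rw [List.findIdx?_cons]
      simp only [hany, if_true]
    · -- no position matches rule a: everything shifts by one
      have hall : ∀ pos ∈ ps, q pos a = false := by
        intro pos hp
        by_contra hc
        exact h (List.any_eq_true.mpr ⟨pos, hp, by simpa using hc⟩)
      have hcong : ps.foldl (fun b pos => omin b (List.findIdx? (q pos) (a :: rs))) none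
          = ps.foldl (fun b pos => omin b ((List.findIdx? (q pos) rs).map (· + 1))) none := by
        apply PySem.List.foldl_congr_mem
        intro b pos hp
        simp [List.findIdx?_cons, hall pos hp]
      rw [hcong]
      have := foldl_omin_map_succ (fun pos => List.findIdx? (q pos) rs) ps none
      simp only [Option.map_none] at this
      rw [this, ih]
      have hna : ps.any (fun pos => q pos a) = false := by simpa using h
      simp [List.findIdx?_cons, hna]

-- a nonempty pattern occurs in ci iff it starts at one of the positions 0..len-1
lemma any_startswith_eq_isIn (pat ci : List Char) (hne : pat ≠ []) :
    (List.range ci.length).any (fun pos => PySem.Chars.startswith (ci.drop pos) pat)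
      = PySem.Chars.isIn pat ci := by
  by_cases h : PySem.Chars.isIn pat ci = true
  · rw [h, List.any_eq_true]
    obtain ⟨j, hj⟩ := (PySem.Chars.exists_prefix_drop_iff_isIn pat ci).mpr h
    have hjlt : j < ci.length := by
      by_contra hge
      have : ci.drop j = [] := List.drop_eq_nil_of_le (by omega)
      rw [this] at hj
      exact hne (List.prefix_nil.mp hj)
    exact ⟨j, List.mem_range.mpr hjlt, (PySem.Chars.startswith_iff _ _).mpr hj⟩
  · have h' : PySem.Chars.isIn pat ci = false := by simpa using h
    rw [h']
    rw [List.any_eq_false]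
    intro pos hp hsw
    apply h
    exact (PySem.Chars.exists_prefix_drop_iff_isIn pat ci).mp
      ⟨pos, (PySem.Chars.startswith_iff _ _).mp hsw⟩

-- findIdx? only looks at the list's elements
lemma findIdx?_congr_mem {α : Type} (l : List α) (p q : α → Bool)
    (h : ∀ a ∈ l, p a = q a) : l.findIdx? p = l.findIdx? q := by
  induction l with
  | nil => rfl
  | cons a l ih =>
    simp only [List.findIdx?_cons]
    rw [h a (by simp), ih (fun a ha => h a (by simp [ha]))]

-- first-match-with-value = first-match-index then lookup
lemma findSome?_eq_findIdx?_bind {α β : Type} (t : α × β → Bool) (l : List (α × β)) :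
    l.findSome? (fun pr => if t pr then some pr.2 else none)
      = (l.findIdx? t).bind (fun i => (l[i]?).map Prod.snd) := by
  induction l with
  | nil => rfl
  | cons pr l ih =>
    simp only [List.findSome?_cons, List.findIdx?_cons]
    by_cases h : t pr
    · simp [h]
    · have h' : t pr = false := by simpa using h
      simp only [h', if_false, Bool.false_eq_true, ih]
      cases l.findIdx? t <;> simp

-- first-match over a block of entries sharing one reason = any() over the block's patterns
lemma findSome?_block (ps : List (List Char)) (r : String)
    (rest : List (List Char × String)) (ci : List Char) :
    ((ps.map (fun p => (p, r))) ++ rest).findSome?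
        (fun pr => if PySem.Chars.isIn pr.1 ci then some pr.2 else none)
      = if ps.any (fun p => PySem.Chars.isIn p ci) then some r
        else rest.findSome? (fun pr => if PySem.Chars.isIn pr.1 ci then some pr.2 else none) := by
  induction ps with
  | nil => simp
  | cons p ps ih =>
    simp only [List.map_cons, List.cons_append, List.findSome?_cons, List.any_cons]
    rcases Bool.eq_false_or_eq_true (PySem.Chars.isIn p ci) with h | h <;> simp [h, ih]

lemma modernLoop_eq_findSome? (items : List (List Char × String)) (ci : List Char) :
    modernLoop items ci
      = items.findSome? (fun pr => if PySem.Chars.isIn pr.1 ci then some pr.2 else none) := by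
  induction items with
  | nil => rfl
  | cons pr rest ih =>
    cases pr with
    | mk p r =>
      simp only [modernLoop, List.findSome?_cons]
      rcases Bool.eq_false_or_eq_true (PySem.Chars.isIn p ci) with h | h <;> simp [h, ih]

-- A's block structure flattened into the single table B uses
lemma portA_eq_table (path user_agent : String) :
    check_waf_rules_py path user_agent
      = if path.toList = [] then none
        else
          let ci := PySem.Chars.lower (path.toList ++ ' ' :: user_agent.toList)
          wafRules.findSome? (fun pr => if PySem.Chars.isIn pr.1 ci then some pr.2 else none) := by
  unfold check_waf_rules_py
  by_cases h : path.toList = []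
  · simp [h]
  · simp only [h, if_false]
    set ci := PySem.Chars.lower (path.toList ++ ' ' :: user_agent.toList) with hci
    have htab : wafRules =
        (sqliPatterns.map (fun p => (p, "SQL-Injection Versuch (WAF Heuristik)"))) ++
        ((xssPatterns.map (fun p => (p, "XSS Versuch (WAF Heuristik)"))) ++
        ((traversalPatterns.map (fun p => (p, "Path Traversal / LFI Versuch (WAF Heuristik)"))) ++
        (modernExploits ++
        (cmdPatterns.map (fun p => (p, "Command Injection Versuch (WAF Heuristik)")))))) := by
      rfl
    rw [htab, findSome?_block, findSome?_block, findSome?_block]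
    split_ifs <;> try rfl
    all_goals
      rw [List.findSome?_append, modernLoop_eq_findSome?]
      have hb := findSome?_block cmdPatterns "Command Injection Versuch (WAF Heuristik)" [] ci
      simp only [List.append_nil, List.findSome?_nil] at hb
      rw [hb]
      cases (modernExploits.findSome?
          (fun pr => if PySem.Chars.isIn pr.1 ci then some pr.2 else none)) <;> simp_all

-- no pattern in the table is empty
lemma wafRules_ne_nil : ∀ pr ∈ wafRules, pr.1 ≠ [] := by decide

-- ===== VERDICT (by name: the statement is the Claim_ definition above) =====
theorem check_waf_rules_py_spec : Claim_equal_check_waf_rules_py := by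
  intro path user_agent _
  unfold Spec_check_waf_rules_py check_waf_rules_py_alt
  rw [portA_eq_table]
  by_cases h : path.toList = []
  · simp [h]
  · simp only [h, if_false]
    set ci := PySem.Chars.lower (path.toList ++ ' ' :: user_agent.toList) with hci
    have hfold : ci.zipIdx.foldl
          (fun b pc => (wafBucketDict.getD pc.1 []).foldl (bucketStep ci pc.2) b) none
        = wafRules.findIdx? (fun pr => PySem.Chars.isIn pr.1 ci) := by
      have h1 : ci.zipIdx.foldl
            (fun b pc => (wafBucketDict.getD pc.1 []).foldl (bucketStep ci pc.2) b) none
          = ci.zipIdx.foldl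
            (fun b pc => omin b (wafRules.findIdx?
               (fun pr => PySem.Chars.startswith (ci.drop pc.2) pr.1))) none := by
        apply PySem.List.foldl_congr_mem
        intro b pc hpc
        have hmem := List.mem_zipIdx (show (pc.1, pc.2) ∈ ci.zipIdx 0 by simpa using hpc)
        obtain ⟨-, hlt, hval⟩ := hmem
        have hpw : ((wafRules.zipIdx.filter (fun pr => pr.1.1.headD ' ' == pc.1)).map
            (fun pr => (pr.2, pr.1.1))).Pairwise (fun x y => x.1 < y.1) := by
          rw [List.pairwise_map]
          exact List.Pairwise.filter _ (zipIdx_pairwise wafRules 0)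
        rw [getD_bucket, bucketFold ci pc.2 _ b hpw,
            find_bucket (fun p => PySem.Chars.startswith (ci.drop pc.2) p) pc.1 wafRules 0
              (fun pr hpr hswp => by
                have := head_of_startswith ci pr.1 pc.2 (wafRules_ne_nil pr hpr)
                  (by omega) hswp
                simpa [hval] using this)]
        cases wafRules.findIdx? (fun pr => PySem.Chars.startswith (ci.drop pc.2) pr.1) <;>
          simp
      rw [h1]
      have h2 : ci.zipIdx.foldl
            (fun b pc => omin b (wafRules.findIdx?
               (fun pr => PySem.Chars.startswith (ci.drop pc.2) pr.1))) none
          = (List.range ci.length).foldl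
            (fun b pos => omin b (wafRules.findIdx?
               (fun pr => PySem.Chars.startswith (ci.drop pos) pr.1))) none := by
        rw [List.range_eq_range', ← List.zipIdx_map_snd 0 ci, List.foldl_map]
      rw [h2]
      refine (foldl_omin_findIdx (fun pos (pr : List Char × String) =>
          PySem.Chars.startswith (ci.drop pos) pr.1) wafRules (List.range ci.length)).trans ?_
      apply findIdx?_congr_mem
      intro pr hpr
      exact any_startswith_eq_isIn pr.1 ci (wafRules_ne_nil pr hpr)
    simp only [hfold, findSome?_eq_findIdx?_bind]
    cases (wafRules.findIdx? (fun pr => PySem.Chars.isIn pr.1 ci)) <;> simp
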